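-- pv_equiv track=rewrite | github.com/driver-oss/beliefs | beliefs/utils/math_helper.py | is_kronecker_delta
-- ===== SOURCE A (Python) =====
-- def is_kronecker_delta(vector):
--     """
--     Check if vector is a kronecker delta.
--
--     Args:
--         vector: iterable of numbers
--     Returns:
--         bool, True if vector is a kronecker delta vector, False otherwise.
--         In belief propagation, specific evidence (variable is directly observed)
--         is a kronecker delta vector, but virtual evidence is not.
--     """
--     count = 0
--     for x in vector:
--         if x == 1:
--             count += 1
--         elif x != 0:
--             return False
--
--     if count == 1:
--         return True
--     else:
--         return False
-- ===== SOURCE B (Python) =====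
-- def is_kronecker_delta(vector):
--     vector = list(vector)
--     return vector.count(1) == 1 and all(x == 0 or x == 1 for x in vector)
-- ===== Notes on version B (the rewrite author's own statement) =====
-- stated objective: simpler
-- what changed: Replaces A's single accumulating early-exit loop with a materialised list and two independent scans: count the ones, then validate every entry is 0 or 1.
import Mathlib
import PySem

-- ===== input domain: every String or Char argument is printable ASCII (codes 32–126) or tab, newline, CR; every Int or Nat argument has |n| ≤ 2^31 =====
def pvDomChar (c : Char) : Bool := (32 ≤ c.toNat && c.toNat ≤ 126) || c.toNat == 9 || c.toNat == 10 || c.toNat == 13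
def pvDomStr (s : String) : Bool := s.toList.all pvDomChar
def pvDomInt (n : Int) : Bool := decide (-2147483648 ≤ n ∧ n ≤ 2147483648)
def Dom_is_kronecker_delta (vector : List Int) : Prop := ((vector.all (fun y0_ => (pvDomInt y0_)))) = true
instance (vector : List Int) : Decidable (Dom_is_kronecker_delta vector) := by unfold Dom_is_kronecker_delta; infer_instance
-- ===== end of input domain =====

-- B replaces A's single accumulating early-exit loop with two independent scans (count the ones; validate entries); objective: simpler.

-- ===== PORT A =====
-- A's loop: accumulates count, returns False early on an element that is neither 1 nor 0.
def is_kronecker_delta_go (xs : List Int) (count : Int) : Bool :=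
  match xs with
  | [] => count == 1
  | x :: rest =>
      if x == 1 then is_kronecker_delta_go rest (count + 1)
      else if x != 0 then false
      else is_kronecker_delta_go rest count

def is_kronecker_delta (vector : List Int) : Bool :=
  is_kronecker_delta_go vector 0

-- ===== PORT B =====
def is_kronecker_delta_alt (vector : List Int) : Bool :=
  (PySem.List.count vector 1 == 1) && vector.all (fun x => x == 0 || x == 1)

-- ===== PRECONDITION & SPEC =====
def Spec_is_kronecker_delta (vector : List Int) (out : Bool) : Prop := out = is_kronecker_delta_alt vector
instance (vector : List Int) (out : Bool) : Decidable (Spec_is_kronecker_delta vector out) := by unfold Spec_is_kronecker_delta; infer_instance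

-- ===== CLAIM (what is proved, stated in full; the proofs are below) =====
def Claim_equal_is_kronecker_delta : Prop := ∀ (vector : List Int), Dom_is_kronecker_delta vector → Spec_is_kronecker_delta vector (is_kronecker_delta vector)

-- ===== LEMMAS AND PROOFS =====
theorem is_kronecker_delta_go_eq (xs : List Int) (c : Int) :
    is_kronecker_delta_go xs c =
      ((c + (xs.count 1 : Int) == 1) && xs.all (fun x => x == 0 || x == 1)) := by
  induction xs generalizing c with
  | nil => simp [is_kronecker_delta_go]
  | cons x rest ih =>
      by_cases h1 : x = 1
      · subst h1
        simp [is_kronecker_delta_go, ih]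
        ring_nf
      · by_cases h0 : x = 0
        · subst h0
          simp [is_kronecker_delta_go, ih]
        · simp [is_kronecker_delta_go, h1, h0]

-- ===== VERDICT (by name: the statement is the Claim_ definition above) =====
theorem is_kronecker_delta_spec : Claim_equal_is_kronecker_delta := by
  intro vector _
  unfold Spec_is_kronecker_delta is_kronecker_delta is_kronecker_delta_alt
  rw [is_kronecker_delta_go_eq]
  simp [PySem.List.count, show ∀ n : Nat, ((n : Int) == (1 : Int)) = (n == 1) from fun n => by simp]
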